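-- pv_equiv track=rewrite | github.com/ramissabirzyanov/tetrika-school-tasks | task3/solution.py | get_online_seconds
-- ===== SOURCE A (Python) =====
-- def get_online_seconds(lesson_interval: list, person_interval: list) -> list:
--     online_sec = []
--     lesson_seconds = [sec for sec in range(lesson_interval[0], lesson_interval[1])]
--     while person_interval:
--         interval_begin = person_interval.pop(0)
--         interval_end = person_interval.pop(0)
--         person_seconds = [num for num in range(interval_begin, interval_end)]
--         for second in person_seconds:
--             if second in lesson_seconds:
--                 online_sec.append(second)
--     return online_sec
-- ===== SOURCE B (Python) =====
-- def get_online_seconds(lesson_interval: list, person_interval: list) -> list: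
--     start, end = lesson_interval[0], lesson_interval[1]
--     online_sec = []
--     for i in range(0, len(person_interval), 2):
--         lo = max(person_interval[i], start)
--         hi = min(person_interval[i + 1], end)
--         online_sec.extend(range(lo, hi))
--     return online_sec
-- ===== Notes on version B (the rewrite author's own statement) =====
-- stated objective: faster
-- what changed: Instead of materialising the whole lesson range as a list and membership-testing every person second against it, B clamps each person interval to the lesson interval and emits range(max(b,start), min(e,end)) directly, removing the inner linear scan; intended as faster (O(P*L) -> O(P+output)); a timing run measured B well above 1.5x at the largest size both finished, but could not confirm at the top size where both are output-bound.
import Mathlib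
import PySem

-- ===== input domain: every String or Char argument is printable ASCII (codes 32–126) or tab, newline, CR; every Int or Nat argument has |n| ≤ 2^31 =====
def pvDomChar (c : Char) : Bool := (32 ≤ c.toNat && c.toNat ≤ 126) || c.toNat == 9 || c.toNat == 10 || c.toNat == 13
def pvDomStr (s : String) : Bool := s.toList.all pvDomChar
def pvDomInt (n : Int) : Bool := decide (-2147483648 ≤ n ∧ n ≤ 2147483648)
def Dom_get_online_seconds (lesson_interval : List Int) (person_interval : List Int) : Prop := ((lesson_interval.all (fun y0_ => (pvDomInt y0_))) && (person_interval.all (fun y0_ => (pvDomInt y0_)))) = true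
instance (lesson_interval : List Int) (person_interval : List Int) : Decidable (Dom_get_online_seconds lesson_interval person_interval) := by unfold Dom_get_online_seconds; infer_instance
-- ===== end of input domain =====

-- B replaces A's per-second membership scan of the materialised lesson list by directly emitting
-- the clamped range overlap per person interval; intended as faster; a timing run measured
-- B well above 1.5x at the largest size both finished (both remain output-bound on huge overlaps).
-- NOTE: Python A consumes person_interval by pop(0); the equivalence proved here is about the
-- RETURN value only (B does not mutate its argument).

-- ===== PORT A =====
-- while loop popping two elements per iteration, accumulator online_sec
def pvGoA (lesson_seconds : List Int) (P : List Int) (acc : List Int) : List Int :=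
  match P with
  | b :: e :: rest =>
      pvGoA lesson_seconds rest
        ((PySem.List.pyRange b e 1).foldl
          (fun a s => if lesson_seconds.contains s then a ++ [s] else a) acc)
  | _ => acc

def get_online_seconds (lesson_interval : List Int) (person_interval : List Int) : List Int :=
  -- lesson_interval[0], lesson_interval[1]: Pre_ guarantees both indices exist (default unused)
  pvGoA (PySem.List.pyRange (PySem.List.pyGetD lesson_interval 0 0) (PySem.List.pyGetD lesson_interval 1 0) 1)
    person_interval []

-- ===== PORT B =====
-- loop over pairs (step-2 index loop in Source B), extending with the clamped range
def pvGoB (start stop : Int) (P : List Int) : List Int :=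
  match P with
  | b :: e :: rest => PySem.List.pyRange (max b start) (min e stop) 1 ++ pvGoB start stop rest
  | _ => []

def get_online_seconds_alt (lesson_interval : List Int) (person_interval : List Int) : List Int :=
  pvGoB (PySem.List.pyGetD lesson_interval 0 0) (PySem.List.pyGetD lesson_interval 1 0) person_interval

-- ===== PRECONDITION & SPEC =====
-- A raises IndexError when lesson_interval has fewer than 2 elements or person_interval has odd
-- length (the second pop(0) fails); exactly those inputs are excluded.
def Pre_get_online_seconds (lesson_interval : List Int) (person_interval : List Int) : Prop :=
  2 ≤ lesson_interval.length ∧ person_interval.length % 2 = 0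
instance (lesson_interval : List Int) (person_interval : List Int) : Decidable (Pre_get_online_seconds lesson_interval person_interval) := by unfold Pre_get_online_seconds; infer_instance

def pvWitness_get_online_seconds : List Int × List Int := ([0, 5], [1, 3, 4, 9])

def Spec_get_online_seconds (lesson_interval : List Int) (person_interval : List Int) (out : List Int) : Prop := out = get_online_seconds_alt lesson_interval person_interval
instance (lesson_interval : List Int) (person_interval : List Int) (out : List Int) : Decidable (Spec_get_online_seconds lesson_interval person_interval out) := by unfold Spec_get_online_seconds; infer_instance

-- ===== CLAIM (what is proved, stated in full; the proofs are below) =====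
def Claim_equal_get_online_seconds : Prop := ∀ (lesson_interval : List Int) (person_interval : List Int), Dom_get_online_seconds lesson_interval person_interval → Pre_get_online_seconds lesson_interval person_interval → Spec_get_online_seconds lesson_interval person_interval (get_online_seconds lesson_interval person_interval)

-- ===== LEMMAS AND PROOFS =====

-- filtering range b..e by membership in range lo..hi is the clamped range
theorem pv_filter_range (b e lo hi : Int) :
    (PySem.List.pyRange b e 1).filter (fun s => decide (lo ≤ s ∧ s < hi)) =
      PySem.List.pyRange (max b lo) (min e hi) 1 := by
  by_cases hbe : e ≤ b
  · rw [PySem.List.pyRange_one_eq_nil hbe, PySem.List.pyRange_one_eq_nil (by omega)]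
    rfl
  · rw [not_le] at hbe
    rw [PySem.List.pyRange_one_cons hbe]
    have ih := pv_filter_range (b + 1) e lo hi
    by_cases hb : lo ≤ b ∧ b < hi
    · have h1 : max b lo = b := by omega
      have h2 : max (b + 1) lo = b + 1 := by omega
      have h3 : b < min e hi := by omega
      simp only [List.filter_cons, decide_eq_true_eq, hb, ih, h1, h2]
      rw [PySem.List.pyRange_one_cons h3]
      simp
    · have h4 : (decide (lo ≤ b ∧ b < hi)) = false := by
        simp only [decide_eq_false_iff_not]; exact hb
      simp only [List.filter_cons, h4, Bool.false_eq_true, if_false, ih]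
      rcases not_and_or.mp hb with h | h
      · rw [not_le] at h
        have : max b lo = max (b + 1) lo := by omega
        rw [this]
      · rw [not_lt] at h
        rw [PySem.List.pyRange_one_eq_nil (by omega),
            PySem.List.pyRange_one_eq_nil (by omega)]
termination_by (e - b).toNat
decreasing_by omega

theorem pv_goA_eq_goB (lo hi : Int) :
    ∀ (P acc : List Int), pvGoA (PySem.List.pyRange lo hi 1) P acc = acc ++ pvGoB lo hi P := by
  intro P
  induction P using pvGoB.induct with
  | case1 b e rest ih =>
      intro acc
      rw [pvGoA, pvGoB]
      rw [PySem.List.foldl_append_if]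
      rw [ih]
      have : (PySem.List.pyRange lo hi 1).contains =
          (fun s => decide (lo ≤ s ∧ s < hi)) := by
        funext s
        simp [PySem.List.mem_pyRange_one]
      rw [this, pv_filter_range]
      simp
  | case2 t h =>
      intro acc
      match t with
      | [] => simp [pvGoA, pvGoB]
      | [x] => simp [pvGoA, pvGoB]
      | b :: e :: rest => exact (h b e rest rfl).elim

-- ===== VERDICT (by name: the statement is the Claim_ definition above) =====
theorem get_online_seconds_spec : Claim_equal_get_online_seconds := by
  intro L P _ _
  unfold Spec_get_online_seconds get_online_seconds get_online_seconds_alt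
  simpa using pv_goA_eq_goB (PySem.List.pyGetD L 0 0) (PySem.List.pyGetD L 1 0) P []
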